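-- pv_equiv track=rewrite | github.com/bob686868/Leetcode-100-day-challenge- | day21.py | min_taps_to_type_word2
-- ===== SOURCE A (Python) =====
-- from collections import Counter
-- import math
--
-- def min_taps_to_type_word2(word):
--     count=Counter(word)
--     i=1
--     taps=0
--
--     for k,v in sorted(count.items(),key=lambda x:x[1],reverse=True):
--         taps+=math.ceil(i/8)*v
--         i+=1
--
--     return taps
-- ===== SOURCE B (Python) =====
-- from collections import Counter
--
-- def min_taps_to_type_word2(word):
--     freqs = sorted(Counter(word).values(), reverse=True)
--     taps = 0
--     tier = 1
--     for start in range(0, len(freqs), 8):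
--         taps += tier * sum(freqs[start:start + 8])
--         tier += 1
--     return taps
-- ===== Notes on version B (the rewrite author's own statement) =====
-- stated objective: alternative
-- what changed: B sorts the frequency values themselves (not the items) descending and sums them in blocks of 8 with a tier multiplier, replacing A's per-character ceil(i/8) computation.
import Mathlib
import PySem

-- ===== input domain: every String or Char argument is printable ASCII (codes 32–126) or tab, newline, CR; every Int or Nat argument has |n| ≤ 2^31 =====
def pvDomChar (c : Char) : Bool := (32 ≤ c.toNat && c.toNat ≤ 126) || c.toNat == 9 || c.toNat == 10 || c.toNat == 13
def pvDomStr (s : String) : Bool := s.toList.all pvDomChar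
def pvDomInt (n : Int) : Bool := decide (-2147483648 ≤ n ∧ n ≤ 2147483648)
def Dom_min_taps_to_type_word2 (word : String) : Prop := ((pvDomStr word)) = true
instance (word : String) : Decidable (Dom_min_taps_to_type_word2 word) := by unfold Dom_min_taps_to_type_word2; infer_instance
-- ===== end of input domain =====

-- B groups the sorted frequencies into blocks of 8 sharing one tier multiplier instead of A's per-rank ceil(i/8); same cost, different decomposition.

-- ===== PORT A =====
-- math.ceil(i/8) for an int i: exact as -((-i) // 8) (ceiling division)
def pvCeil8 (i : Int) : Int := -(PySem.Int.floordiv (-i) 8)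

def min_taps_to_type_word2 (word : String) : Int :=
  let count := PySem.Dict.counter word.toList
  let st := (PySem.List.sorted count.items (fun p => p.2) true).foldl
      (fun (st : Int × Int) kv => (st.1 + 1, st.2 + pvCeil8 st.1 * kv.2)) (1, 0)
  st.2

-- ===== PORT B =====
-- blocks of 8: taps += tier * sum(freqs[start:start+8])
def pvTierSum (t : Int) (l : List Int) : Int :=
  match l with
  | [] => 0
  | x :: xs => t * ((x :: xs).take 8).sum + pvTierSum (t + 1) ((x :: xs).drop 8)
termination_by l.length
decreasing_by simp [List.length_drop]

def min_taps_to_type_word2_alt (word : String) : Int :=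
  pvTierSum 1 (PySem.List.sorted (PySem.Dict.counter word.toList).values (fun x => x) true)

-- ===== PRECONDITION & SPEC =====
def Spec_min_taps_to_type_word2 (word : String) (out : Int) : Prop := out = min_taps_to_type_word2_alt word
instance (word : String) (out : Int) : Decidable (Spec_min_taps_to_type_word2 word out) := by unfold Spec_min_taps_to_type_word2; infer_instance

-- ===== CLAIM (what is proved, stated in full; the proofs are below) =====
def Claim_equal_min_taps_to_type_word2 : Prop := ∀ (word : String), Dom_min_taps_to_type_word2 word → Spec_min_taps_to_type_word2 word (min_taps_to_type_word2 word)

-- ===== LEMMAS AND PROOFS =====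

lemma pvTierSum_nil (t : Int) : pvTierSum t [] = 0 := by rw [pvTierSum.eq_def]

lemma pvTierSum_cons (t x : Int) (xs : List Int) :
    pvTierSum t (x :: xs)
      = t * ((x :: xs).take 8).sum + pvTierSum (t + 1) ((x :: xs).drop 8) := by
  rw [pvTierSum.eq_def]

-- ceil((8(t-1)+1+k)/8) = t for 0 ≤ k < 8
lemma pvCeil8_in_tier (t k : Int) (h0 : 0 ≤ k) (h8 : k < 8) :
    pvCeil8 (8 * (t - 1) + 1 + k) = t := by
  unfold pvCeil8
  rw [PySem.Int.neg_floordiv_neg_eq_iff_of_pos (by norm_num)]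
  omega

-- A's loop over one block whose ranks all share multiplier t
lemma pvBlock_foldl (s : List Int) (t : Int) :
    ∀ (i taps : Int), (∀ k : Int, 0 ≤ k → k < (s.length : Int) → pvCeil8 (i + k) = t) →
    s.foldl (fun (st : Int × Int) v => (st.1 + 1, st.2 + pvCeil8 st.1 * v)) (i, taps)
      = (i + s.length, taps + t * s.sum) := by
  induction s with
  | nil => intro i taps _; simp
  | cons x xs ih =>
    intro i taps h
    have hx : pvCeil8 i = t := by
      simpa using h 0 le_rfl (by push_cast [List.length_cons]; omega)
    simp only [List.foldl_cons, hx]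
    rw [ih (i + 1) (taps + t * x) (fun k hk0 hk => by
      have := h (k + 1) (by omega) (by push_cast [List.length_cons] at hk ⊢; omega)
      rwa [show i + 1 + k = i + (k + 1) by ring])]
    simp [List.sum_cons]
    constructor
    · omega
    · ring

-- A's loop starting at the first rank of tier t equals B's tier-chunked sum
lemma pvLoop_eq_tierSum (n : Nat) : ∀ (l : List Int), l.length ≤ n → ∀ (t taps : Int),
    (l.foldl (fun (st : Int × Int) v => (st.1 + 1, st.2 + pvCeil8 st.1 * v))
        (8 * (t - 1) + 1, taps)).2 = taps + pvTierSum t l := by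
  induction n with
  | zero =>
    intro l hl t taps
    have : l = [] := List.eq_nil_of_length_eq_zero (Nat.le_zero.mp hl)
    subst this; simp [pvTierSum_nil]
  | succ n ih =>
    intro l hl t taps
    match l with
    | [] => simp [pvTierSum_nil]
    | x :: xs =>
      rw [show (x :: xs) = (x :: xs).take 8 ++ (x :: xs).drop 8 by simp,
          List.foldl_append]
      have hlen : ((x :: xs).take 8).length = min 8 (x :: xs).length := by
        simp; omega
      rw [pvBlock_foldl ((x :: xs).take 8) t _ _ (fun k hk0 hk => by
        apply pvCeil8_in_tier t k hk0
        have : ((x :: xs).take 8).length ≤ 8 := by simp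
        omega)]
      by_cases hsmall : (x :: xs).length ≤ 8
      · have hd : (x :: xs).drop 8 = [] := by
          apply List.drop_eq_nil_of_le; exact hsmall
        have htk : (x :: xs).take 8 = x :: xs := List.take_of_length_le hsmall
        rw [List.take_append_drop, hd]
        simp only [List.foldl_nil]
        rw [pvTierSum_cons, hd, pvTierSum_nil, htk]
        ring
      · have hstep : (8 * (t - 1) + 1 + (((x :: xs).take 8).length : Int))
            = 8 * ((t + 1) - 1) + 1 := by
          rw [hlen]; push_cast; omega
        rw [hstep, ih ((x :: xs).drop 8) (by simp only [List.length_drop, List.length_cons] at hl ⊢; omega) (t + 1)]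
        rw [List.take_append_drop, pvTierSum_cons]
        ring

-- the descending value list of A's sorted items is B's sorted values
lemma pvSorted_values_eq (d : PySem.Dict Char Int) :
    (PySem.List.sorted d.items (fun p => p.2) true).map (fun p => p.2)
      = PySem.List.sorted d.values (fun x => x) true := by
  apply PySem.List.eq_of_perm_of_pairwise_le_of_injective (fun x : Int => -x)
    neg_injective
  · exact ((PySem.List.sorted_perm d.items (fun p => p.2) true).map _).trans
      ((PySem.List.sorted_perm d.values (fun x => x) true).symm)
  · exact List.Pairwise.map _ (fun a b h => neg_le_neg h)
      (PySem.List.sorted_pairwise_rev d.items (fun p => p.2))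
  · exact (PySem.List.sorted_pairwise_rev d.values (fun x => x)).imp
      (fun h => neg_le_neg h)

-- ===== VERDICT (by name: the statement is the Claim_ definition above) =====
theorem min_taps_to_type_word2_spec : Claim_equal_min_taps_to_type_word2 := by
  intro word _
  unfold Spec_min_taps_to_type_word2 min_taps_to_type_word2 min_taps_to_type_word2_alt
  simp only []
  rw [← pvSorted_values_eq (PySem.Dict.counter word.toList)]
  have h2 := pvLoop_eq_tierSum
    ((PySem.List.sorted (PySem.Dict.counter word.toList).items (fun p => p.2) true).map (fun p => p.2)).length
    ((PySem.List.sorted (PySem.Dict.counter word.toList).items (fun p => p.2) true).map (fun p => p.2))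
    le_rfl 1 0
  simpa [List.foldl_map] using h2
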